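-- pv_equiv track=rewrite | github.com/Tyler-Yates/personalities | personalities/personalities.py | convert_mbti_to_functions
-- ===== SOURCE A (Python) =====
-- from typing import List
--
-- MBTI_PERSONALITIES = frozenset(
--     [
--         "ISTJ",
--         "ISTP",
--         "ISFJ",
--         "ISFP",
--         "INFJ",
--         "INFP",
--         "INTJ",
--         "INTP",
--         "ESTP",
--         "ESTJ",
--         "ESFP",
--         "ESFJ",
--         "ENFP",
--         "ENFJ",
--         "ENTP",
--         "ENTJ",
--     ]
-- )
--
-- FUNCTION_OPPOSITES = {
--     "N": "S",
--     "S": "N",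
--     "T": "F",
--     "F": "T",
-- }
--
-- def convert_mbti_to_functions(mbti: str) -> List[str]:
--     mbti = mbti.upper()
--     if mbti not in MBTI_PERSONALITIES:
--         raise ValueError(f"Input MBTI personality {mbti} is not correct.")
--
--     # Function expressions ('i' vs 'e')
--     function_expression = []
--     check = 0 if mbti[0] == "E" else 1
--     for i in range(4):
--         if i % 2 == check:
--             function_expression.append("e")
--         else:
--             function_expression.append("i")
--     function_expression.extend(reversed(function_expression))
--
--     # Primary functions
--     functions = []
--     extraverted_function = mbti[1] if mbti[3] == "P" else mbti[2]
--     introverted_function = mbti[2] if mbti[3] == "P" else mbti[1]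
--     if mbti[0] == "E":
--         functions.append(extraverted_function)
--         functions.append(introverted_function)
--     else:
--         functions.append(introverted_function)
--         functions.append(extraverted_function)
--     functions.append(_get_opposite_function(functions[1]))
--     functions.append(_get_opposite_function(functions[0]))
--
--     # Shadow functions
--     functions.extend(functions)
--
--     return [f"{functions[i]}{function_expression[i]}" for i in range(8)]
--
-- def _get_opposite_function(function: str) -> str:
--     return FUNCTION_OPPOSITES.get(function)
-- ===== SOURCE B (Python) =====
-- from typing import List
--
-- # Every MBTI type's cognitive-function stack, precomputed once: the domain has
-- # exactly 16 members, so a lookup table replaces any per-call derivation.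
-- FUNCTION_STACKS = {
--     "ISTJ": ['Si', 'Te', 'Fi', 'Ne', 'Se', 'Ti', 'Fe', 'Ni'],
--     "ISTP": ['Ti', 'Se', 'Ni', 'Fe', 'Te', 'Si', 'Ne', 'Fi'],
--     "ISFJ": ['Si', 'Fe', 'Ti', 'Ne', 'Se', 'Fi', 'Te', 'Ni'],
--     "ISFP": ['Fi', 'Se', 'Ni', 'Te', 'Fe', 'Si', 'Ne', 'Ti'],
--     "INFJ": ['Ni', 'Fe', 'Ti', 'Se', 'Ne', 'Fi', 'Te', 'Si'],
--     "INFP": ['Fi', 'Ne', 'Si', 'Te', 'Fe', 'Ni', 'Se', 'Ti'],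
--     "INTJ": ['Ni', 'Te', 'Fi', 'Se', 'Ne', 'Ti', 'Fe', 'Si'],
--     "INTP": ['Ti', 'Ne', 'Si', 'Fe', 'Te', 'Ni', 'Se', 'Fi'],
--     "ESTP": ['Se', 'Ti', 'Fe', 'Ni', 'Si', 'Te', 'Fi', 'Ne'],
--     "ESTJ": ['Te', 'Si', 'Ne', 'Fi', 'Ti', 'Se', 'Ni', 'Fe'],
--     "ESFP": ['Se', 'Fi', 'Te', 'Ni', 'Si', 'Fe', 'Ti', 'Ne'],
--     "ESFJ": ['Fe', 'Si', 'Ne', 'Ti', 'Fi', 'Se', 'Ni', 'Te'],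
--     "ENFP": ['Ne', 'Fi', 'Te', 'Si', 'Ni', 'Fe', 'Ti', 'Se'],
--     "ENFJ": ['Fe', 'Ni', 'Se', 'Ti', 'Fi', 'Ne', 'Si', 'Te'],
--     "ENTP": ['Ne', 'Ti', 'Fe', 'Si', 'Ni', 'Te', 'Fi', 'Se'],
--     "ENTJ": ['Te', 'Ni', 'Se', 'Fi', 'Ti', 'Ne', 'Si', 'Fe'],
-- }
--
--
-- def convert_mbti_to_functions(mbti: str) -> List[str]:
--     mbti = mbti.upper()
--     try:
--         return list(FUNCTION_STACKS[mbti])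
--     except KeyError:
--         raise ValueError(f"Input MBTI personality {mbti} is not correct.")
-- ===== Notes on version B (the rewrite author's own statement) =====
-- stated objective: alternative
-- what changed: B replaces A's per-call derivation (expression loop, dominant/auxiliary selection, opposites, self-extension, index comprehension) with a single precomputed 16-entry lookup table mapping each MBTI type to its full 8-function stack.
import Mathlib
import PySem

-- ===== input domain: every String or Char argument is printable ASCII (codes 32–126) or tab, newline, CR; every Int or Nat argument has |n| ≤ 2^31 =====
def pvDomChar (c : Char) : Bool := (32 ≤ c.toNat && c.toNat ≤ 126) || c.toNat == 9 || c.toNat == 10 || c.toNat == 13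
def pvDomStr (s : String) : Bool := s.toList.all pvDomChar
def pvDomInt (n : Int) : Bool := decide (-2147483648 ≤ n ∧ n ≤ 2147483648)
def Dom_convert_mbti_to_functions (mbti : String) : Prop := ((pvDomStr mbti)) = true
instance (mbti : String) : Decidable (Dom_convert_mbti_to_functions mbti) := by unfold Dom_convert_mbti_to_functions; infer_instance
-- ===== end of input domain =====

-- B looks the whole 8-function stack up in a precomputed 16-entry table instead of deriving
-- it per call (objective: alternative structure). A raises ValueError outside the 16 types;
-- Pre_ excludes exactly those inputs.

-- ===== PORT A =====
def MBTI_PERSONALITIES : List String :=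
  ["ISTJ", "ISTP", "ISFJ", "ISFP", "INFJ", "INFP", "INTJ", "INTP",
   "ESTP", "ESTJ", "ESFP", "ESFJ", "ENFP", "ENFJ", "ENTP", "ENTJ"]

def FUNCTION_OPPOSITES : PySem.Dict String String :=
  PySem.Dict.ofList [("N", "S"), ("S", "N"), ("T", "F"), ("F", "T")]

-- _get_opposite_function; the `.getD ""` default is unreachable on inputs where A returns
-- (the membership check has already passed, so the letter is one of N/S/T/F).
def pvGetOppositeFunction (f : String) : String :=
  (PySem.Dict.get? FUNCTION_OPPOSITES f).getD ""

-- mbti[i] as a 1-character string; in-range on the branch where A returns.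
def pvCharAt (m : String) (i : Int) : String :=
  ((PySem.Str.pyGet? m i).getD ' ').toString

def convert_mbti_to_functions (mbti : String) : List String :=
  let m := PySem.Str.upper mbti
  if m ∈ MBTI_PERSONALITIES then
    let check : Int := if PySem.Str.pyGet? m 0 = some 'E' then 0 else 1
    let function_expression := (PySem.List.pyRange 0 4 1).foldl
      (fun acc i => if PySem.Int.mod i 2 = check then acc ++ ["e"] else acc ++ ["i"]) []
    let function_expression := function_expression ++ function_expression.reverse
    let extraverted_function := if PySem.Str.pyGet? m 3 = some 'P' then pvCharAt m 1 else pvCharAt m 2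
    let introverted_function := if PySem.Str.pyGet? m 3 = some 'P' then pvCharAt m 2 else pvCharAt m 1
    let functions :=
      if PySem.Str.pyGet? m 0 = some 'E' then [extraverted_function, introverted_function]
      else [introverted_function, extraverted_function]
    let functions := functions ++ [pvGetOppositeFunction (PySem.List.pyGetD functions 1 "")]
    let functions := functions ++ [pvGetOppositeFunction (PySem.List.pyGetD functions 0 "")]
    let functions := functions ++ functions
    (PySem.List.pyRange 0 8 1).map
      (fun i => PySem.List.pyGetD functions i "" ++ PySem.List.pyGetD function_expression i "")
  else []  -- Python raises ValueError here; excluded by Pre_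

-- ===== PORT B =====
def FUNCTION_STACKS : PySem.Dict String (List String) :=
  PySem.Dict.ofList
  [   ("ISTJ", ["Si", "Te", "Fi", "Ne", "Se", "Ti", "Fe", "Ni"]),
   ("ISTP", ["Ti", "Se", "Ni", "Fe", "Te", "Si", "Ne", "Fi"]),
   ("ISFJ", ["Si", "Fe", "Ti", "Ne", "Se", "Fi", "Te", "Ni"]),
   ("ISFP", ["Fi", "Se", "Ni", "Te", "Fe", "Si", "Ne", "Ti"]),
   ("INFJ", ["Ni", "Fe", "Ti", "Se", "Ne", "Fi", "Te", "Si"]),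
   ("INFP", ["Fi", "Ne", "Si", "Te", "Fe", "Ni", "Se", "Ti"]),
   ("INTJ", ["Ni", "Te", "Fi", "Se", "Ne", "Ti", "Fe", "Si"]),
   ("INTP", ["Ti", "Ne", "Si", "Fe", "Te", "Ni", "Se", "Fi"]),
   ("ESTP", ["Se", "Ti", "Fe", "Ni", "Si", "Te", "Fi", "Ne"]),
   ("ESTJ", ["Te", "Si", "Ne", "Fi", "Ti", "Se", "Ni", "Fe"]),
   ("ESFP", ["Se", "Fi", "Te", "Ni", "Si", "Fe", "Ti", "Ne"]),
   ("ESFJ", ["Fe", "Si", "Ne", "Ti", "Fi", "Se", "Ni", "Te"]),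
   ("ENFP", ["Ne", "Fi", "Te", "Si", "Ni", "Fe", "Ti", "Se"]),
   ("ENFJ", ["Fe", "Ni", "Se", "Ti", "Fi", "Ne", "Si", "Te"]),
   ("ENTP", ["Ne", "Ti", "Fe", "Si", "Ni", "Te", "Fi", "Se"]),
   ("ENTJ", ["Te", "Ni", "Se", "Fi", "Ti", "Ne", "Si", "Fe"]),
  ]

def convert_mbti_to_functions_alt (mbti : String) : List String :=
  let m := PySem.Str.upper mbti
  match PySem.Dict.get? FUNCTION_STACKS m with
  | some stack => stack
  | none => []  -- Python raises ValueError here; excluded by Pre_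

-- ===== PRECONDITION & SPEC =====
-- A raises ValueError exactly when the uppercased input is not one of the 16 MBTI types.
def Pre_convert_mbti_to_functions (mbti : String) : Prop :=
  PySem.Str.upper mbti ∈
    ["ISTJ", "ISTP", "ISFJ", "ISFP", "INFJ", "INFP", "INTJ", "INTP",
     "ESTP", "ESTJ", "ESFP", "ESFJ", "ENFP", "ENFJ", "ENTP", "ENTJ"]
instance (mbti : String) : Decidable (Pre_convert_mbti_to_functions mbti) := by
  unfold Pre_convert_mbti_to_functions; infer_instance

def pvWitness_convert_mbti_to_functions : String := "enfp"

def Spec_convert_mbti_to_functions (mbti : String) (out : List String) : Prop := out = convert_mbti_to_functions_alt mbti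
instance (mbti : String) (out : List String) : Decidable (Spec_convert_mbti_to_functions mbti out) := by unfold Spec_convert_mbti_to_functions; infer_instance

-- ===== CLAIM =====
def Claim_equal_convert_mbti_to_functions : Prop := ∀ (mbti : String), Dom_convert_mbti_to_functions mbti → Pre_convert_mbti_to_functions mbti → Spec_convert_mbti_to_functions mbti (convert_mbti_to_functions mbti)

-- ===== LEMMAS AND PROOFS =====
-- Both ports depend on the input only through its uppercasing, so 16 closed computations suffice.
-- ===== VERDICT =====
theorem convert_mbti_to_functions_spec : Claim_equal_convert_mbti_to_functions := by
  intro mbti _ hpre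
  unfold Spec_convert_mbti_to_functions
  unfold Pre_convert_mbti_to_functions at hpre
  simp only [List.mem_cons, List.not_mem_nil, or_false] at hpre
  rcases hpre with h|h|h|h|h|h|h|h|h|h|h|h|h|h|h|h <;>
    simp only [convert_mbti_to_functions, convert_mbti_to_functions_alt, h] <;> rfl
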